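-- pv_equiv track=rewrite | github.com/basedlsg/Nemo_Time | functions/query/perplexity.py | _prioritize_relevance
-- ===== SOURCE A (Python) =====
-- from typing import Dict, Any, List, Optional
--
-- def _prioritize_relevance(urls: List[str], question: str, asset: str, topic: str) -> List[str]:
--     # Topic-aware preferences
--     if topic == 'rail_freight':
--         preferred = ["nra.gov.cn", "mot.gov.cn", "95306.cn", "12306.cn", ".gov.cn"]
--         bad = ["csrc.gov.cn"]
--     elif topic in ('land_survey', 'permitting', 'siting'):
--         preferred = ["mnr.gov.cn", "nr.gd.gov.cn", "td.gd.gov.cn", "gd.gov.cn", "mohurd.gov.cn", "mee.gov.cn", ".gov.cn"]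
--         bad = ["nra.gov.cn", "95306.cn", "12306.cn", "csg.cn"]
--     elif topic in ('grid_connection', 'renewables'):
--         preferred = ["gdwenergy.gov.cn", "ndrc.gov.cn", "nea.gov.cn", "gd.gov.cn", ".gov.cn"]
--         bad = ["csrc.gov.cn"]
--     else:
--         preferred = ["gd.gov.cn", ".gov.cn", "ndrc.gov.cn", "nea.gov.cn"]
--         bad = ["csrc.gov.cn"]
--     def score(u: str) -> int:
--         s = 0
--         for p in preferred:
--             if p.startswith("."):
--                 if u.endswith(p): s += 1
--             else:
--                 if p in u: s += 2
--         for b in bad: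
--             if b in u: s -= 2
--         return s
--     return sorted(urls, key=score, reverse=True)
-- ===== SOURCE B (Python) =====
-- from typing import Dict, Any, List, Optional
--
-- _TABLES = {
--     'rail_freight': (["nra.gov.cn", "mot.gov.cn", "95306.cn", "12306.cn", ".gov.cn"],
--                      ["csrc.gov.cn"]),
--     'land_survey': (["mnr.gov.cn", "nr.gd.gov.cn", "td.gd.gov.cn", "gd.gov.cn", "mohurd.gov.cn", "mee.gov.cn", ".gov.cn"],
--                     ["nra.gov.cn", "95306.cn", "12306.cn", "csg.cn"]),
--     'permitting': (["mnr.gov.cn", "nr.gd.gov.cn", "td.gd.gov.cn", "gd.gov.cn", "mohurd.gov.cn", "mee.gov.cn", ".gov.cn"],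
--                    ["nra.gov.cn", "95306.cn", "12306.cn", "csg.cn"]),
--     'siting': (["mnr.gov.cn", "nr.gd.gov.cn", "td.gd.gov.cn", "gd.gov.cn", "mohurd.gov.cn", "mee.gov.cn", ".gov.cn"],
--                ["nra.gov.cn", "95306.cn", "12306.cn", "csg.cn"]),
--     'grid_connection': (["gdwenergy.gov.cn", "ndrc.gov.cn", "nea.gov.cn", "gd.gov.cn", ".gov.cn"],
--                         ["csrc.gov.cn"]),
--     'renewables': (["gdwenergy.gov.cn", "ndrc.gov.cn", "nea.gov.cn", "gd.gov.cn", ".gov.cn"],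
--                    ["csrc.gov.cn"]),
-- }
--
-- def _prioritize_relevance(urls: List[str], question: str, asset: str, topic: str) -> List[str]:
--     preferred, bad = _TABLES.get(topic, (["gd.gov.cn", ".gov.cn", "ndrc.gov.cn", "nea.gov.cn"], ["csrc.gov.cn"]))
--
--     def score(u: str) -> int:
--         return (sum(2 for p in preferred if not p.startswith('.') and p in u)
--                 + sum(1 for p in preferred if p.startswith('.') and u.endswith(p))
--                 - sum(2 for b in bad if b in u))
--
--     # Counting sort over the bounded score range, highest score first; stable by construction.
--     scored = [(score(u), u) for u in urls]
--     out: List[str] = []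
--     for s in range(2 * len(preferred), -2 * len(bad) - 1, -1):
--         out += [u for (t, u) in scored if t == s]
--     return out
-- ===== Notes on version B (the rewrite author's own statement) =====
-- stated objective: alternative
-- what changed: Replaces the stable reverse comparison sort with a counting sort: the topic tables come from a module-level dict, each score is computed once as three generator sums, and a loop over the bounded score range (2*len(preferred) down to -2*len(bad)) concatenates the equal-score groups in input order, reproducing sorted(..., reverse=True) stability.
import Mathlib
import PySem

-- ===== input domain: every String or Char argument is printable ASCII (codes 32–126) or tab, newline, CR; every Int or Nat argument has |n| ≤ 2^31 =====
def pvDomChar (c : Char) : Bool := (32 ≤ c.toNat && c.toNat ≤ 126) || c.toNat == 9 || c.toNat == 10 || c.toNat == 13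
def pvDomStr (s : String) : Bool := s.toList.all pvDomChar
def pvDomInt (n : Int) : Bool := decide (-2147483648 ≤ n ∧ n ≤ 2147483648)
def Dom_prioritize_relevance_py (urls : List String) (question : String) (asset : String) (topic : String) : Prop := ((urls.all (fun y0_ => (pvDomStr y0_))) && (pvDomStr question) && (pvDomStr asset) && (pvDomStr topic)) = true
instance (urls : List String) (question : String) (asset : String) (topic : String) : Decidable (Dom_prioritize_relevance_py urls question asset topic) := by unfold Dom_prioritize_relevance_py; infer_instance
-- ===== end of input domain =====

-- B replaces A's stable reverse comparison sort by a counting sort over the bounded score range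
-- (scores computed once as sums, a descending range loop concatenating equal-score groups);
-- same return value, no speed claim.

-- ===== PORT A =====
-- A's topic dispatch (if/elif chain)
def pvTablesA (topic : String) : List String × List String :=
  if topic = "rail_freight" then
    (["nra.gov.cn", "mot.gov.cn", "95306.cn", "12306.cn", ".gov.cn"], ["csrc.gov.cn"])
  else if topic = "land_survey" ∨ topic = "permitting" ∨ topic = "siting" then
    (["mnr.gov.cn", "nr.gd.gov.cn", "td.gd.gov.cn", "gd.gov.cn", "mohurd.gov.cn", "mee.gov.cn", ".gov.cn"],
     ["nra.gov.cn", "95306.cn", "12306.cn", "csg.cn"])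
  else if topic = "grid_connection" ∨ topic = "renewables" then
    (["gdwenergy.gov.cn", "ndrc.gov.cn", "nea.gov.cn", "gd.gov.cn", ".gov.cn"], ["csrc.gov.cn"])
  else
    (["gd.gov.cn", ".gov.cn", "ndrc.gov.cn", "nea.gov.cn"], ["csrc.gov.cn"])

-- A's inner 'score' closure: an accumulator loop over preferred, then over bad
def pvScoreA (preferred bad : List String) (u : String) : Int :=
  let s := preferred.foldl (fun s p =>
    if PySem.Str.startswith p "." then (if PySem.Str.endswith u p then s + 1 else s)
    else (if PySem.Str.isIn p u then s + 2 else s)) 0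
  bad.foldl (fun s b => if PySem.Str.isIn b u then s - 2 else s) s

def prioritize_relevance_py (urls : List String) (question : String) (asset : String) (topic : String) : List String :=
  let pb := pvTablesA topic
  PySem.List.sorted urls (pvScoreA pb.1 pb.2) true

-- ===== PORT B =====
-- B's module-level table dict (_TABLES)
def pvTablesB : PySem.Dict String (List String × List String) :=
  PySem.Dict.ofList
    [("rail_freight",
      (["nra.gov.cn", "mot.gov.cn", "95306.cn", "12306.cn", ".gov.cn"], ["csrc.gov.cn"])),
     ("land_survey",
      (["mnr.gov.cn", "nr.gd.gov.cn", "td.gd.gov.cn", "gd.gov.cn", "mohurd.gov.cn", "mee.gov.cn", ".gov.cn"],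
       ["nra.gov.cn", "95306.cn", "12306.cn", "csg.cn"])),
     ("permitting",
      (["mnr.gov.cn", "nr.gd.gov.cn", "td.gd.gov.cn", "gd.gov.cn", "mohurd.gov.cn", "mee.gov.cn", ".gov.cn"],
       ["nra.gov.cn", "95306.cn", "12306.cn", "csg.cn"])),
     ("siting",
      (["mnr.gov.cn", "nr.gd.gov.cn", "td.gd.gov.cn", "gd.gov.cn", "mohurd.gov.cn", "mee.gov.cn", ".gov.cn"],
       ["nra.gov.cn", "95306.cn", "12306.cn", "csg.cn"])),
     ("grid_connection",
      (["gdwenergy.gov.cn", "ndrc.gov.cn", "nea.gov.cn", "gd.gov.cn", ".gov.cn"], ["csrc.gov.cn"])),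
     ("renewables",
      (["gdwenergy.gov.cn", "ndrc.gov.cn", "nea.gov.cn", "gd.gov.cn", ".gov.cn"], ["csrc.gov.cn"]))]

-- B's 'score': three generator sums (filter-then-sum), no running accumulator
def pvScoreB (preferred bad : List String) (u : String) : Int :=
  ((preferred.filter (fun p => !PySem.Str.startswith p "." && PySem.Str.isIn p u)).map
      (fun _ => (2 : Int))).sum
  + ((preferred.filter (fun p => PySem.Str.startswith p "." && PySem.Str.endswith u p)).map
      (fun _ => (1 : Int))).sum
  - ((bad.filter (fun b => PySem.Str.isIn b u)).map (fun _ => (2 : Int))).sum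

def prioritize_relevance_py_alt (urls : List String) (question : String) (asset : String) (topic : String) : List String :=
  let pb := pvTablesB.getD topic
    (["gd.gov.cn", ".gov.cn", "ndrc.gov.cn", "nea.gov.cn"], ["csrc.gov.cn"])
  let scored := urls.map (fun u => (pvScoreB pb.1 pb.2 u, u))
  (PySem.List.pyRange (2 * (pb.1.length : Int)) (-2 * (pb.2.length : Int) - 1) (-1)).foldl
    (fun out s => out ++ (scored.filter (fun tu => tu.1 == s)).map (fun tu => tu.2)) []

-- ===== PRECONDITION & SPEC =====
def Spec_prioritize_relevance_py (urls : List String) (question : String) (asset : String) (topic : String) (out : List String) : Prop := out = prioritize_relevance_py_alt urls question asset topic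
instance (urls : List String) (question : String) (asset : String) (topic : String) (out : List String) : Decidable (Spec_prioritize_relevance_py urls question asset topic out) := by unfold Spec_prioritize_relevance_py; infer_instance

-- ===== CLAIM (what is proved, stated in full; the proofs are below) =====
def Claim_equal_prioritize_relevance_py : Prop := ∀ (urls : List String) (question : String) (asset : String) (topic : String), Dom_prioritize_relevance_py urls question asset topic → Spec_prioritize_relevance_py urls question asset topic (prioritize_relevance_py urls question asset topic)

-- ===== LEMMAS AND PROOFS =====

-- B's dict lookup yields exactly A's if/elif tables
theorem pv_tables_eq (topic : String) :
    pvTablesB.getD topic (["gd.gov.cn", ".gov.cn", "ndrc.gov.cn", "nea.gov.cn"], ["csrc.gov.cn"])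
      = pvTablesA topic := by
  by_cases h1 : topic = "rail_freight"
  · subst h1; decide
  by_cases h2 : topic = "land_survey"
  · subst h2; decide
  by_cases h3 : topic = "permitting"
  · subst h3; decide
  by_cases h4 : topic = "siting"
  · subst h4; decide
  by_cases h5 : topic = "grid_connection"
  · subst h5; decide
  by_cases h6 : topic = "renewables"
  · subst h6; decide
  have e1 : ("rail_freight" == topic) = false := by simp [Ne.symm h1]
  have e2 : ("land_survey" == topic) = false := by simp [Ne.symm h2]
  have e3 : ("permitting" == topic) = false := by simp [Ne.symm h3]
  have e4 : ("siting" == topic) = false := by simp [Ne.symm h4]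
  have e5 : ("grid_connection" == topic) = false := by simp [Ne.symm h5]
  have e6 : ("renewables" == topic) = false := by simp [Ne.symm h6]
  have hB : pvTablesB = PySem.Dict.mk
      [("rail_freight",
        (["nra.gov.cn", "mot.gov.cn", "95306.cn", "12306.cn", ".gov.cn"], ["csrc.gov.cn"])),
       ("land_survey",
        (["mnr.gov.cn", "nr.gd.gov.cn", "td.gd.gov.cn", "gd.gov.cn", "mohurd.gov.cn", "mee.gov.cn", ".gov.cn"],
         ["nra.gov.cn", "95306.cn", "12306.cn", "csg.cn"])),
       ("permitting",
        (["mnr.gov.cn", "nr.gd.gov.cn", "td.gd.gov.cn", "gd.gov.cn", "mohurd.gov.cn", "mee.gov.cn", ".gov.cn"],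
         ["nra.gov.cn", "95306.cn", "12306.cn", "csg.cn"])),
       ("siting",
        (["mnr.gov.cn", "nr.gd.gov.cn", "td.gd.gov.cn", "gd.gov.cn", "mohurd.gov.cn", "mee.gov.cn", ".gov.cn"],
         ["nra.gov.cn", "95306.cn", "12306.cn", "csg.cn"])),
       ("grid_connection",
        (["gdwenergy.gov.cn", "ndrc.gov.cn", "nea.gov.cn", "gd.gov.cn", ".gov.cn"], ["csrc.gov.cn"])),
       ("renewables",
        (["gdwenergy.gov.cn", "ndrc.gov.cn", "nea.gov.cn", "gd.gov.cn", ".gov.cn"], ["csrc.gov.cn"]))] := by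
    decide
  rw [hB, PySem.Dict.getD_eq_get?_getD]
  simp [pvTablesA, PySem.Dict.get?_mk_cons, e1, e2, e3, e4, e5, e6, h1, h2, h3, h4, h5, h6,
    PySem.Dict.get?]

theorem pv_flatMap_congr {α β : Type} {l : List α} {f g : α → List β}
    (h : ∀ x ∈ l, f x = g x) : l.flatMap f = l.flatMap g := by
  induction l with
  | nil => rfl
  | cons x l ih =>
    simp only [List.flatMap_cons, h x (by simp), ih (fun y hy => h y (by simp [hy]))]

theorem pv_insertBy_append_left {α : Type} (before : α → α → Bool) (x : α) (P C : List α)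
    (h : ∀ y ∈ P, before x y = false) :
    PySem.List.insertBy before x (P ++ C) = P ++ PySem.List.insertBy before x C := by
  induction P with
  | nil => simp
  | cons y P ih =>
    have hy : before x y = false := h y (by simp)
    simp only [List.cons_append, PySem.List.insertBy, hy, Bool.false_eq_true, if_false]
    simpa using ih (fun z hz => h z (by simp [hz]))

theorem pv_insertBy_all_before {α : Type} (before : α → α → Bool) (x : α) (C : List α)
    (h : ∀ y ∈ C, before x y = true) :
    PySem.List.insertBy before x C = x :: C := by
  cases C with
  | nil => rfl
  | cons y ys => simp [PySem.List.insertBy, h y (by simp)]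

-- one insertion step of A's stable insertion sort = appending x to its score group
theorem pv_bucket_step {α : Type} (key : α → Int) (ks : List Int)
    (hks : ks.Pairwise (· > ·)) (x : α) (hx : key x ∈ ks) (L : List α) :
    PySem.List.insertBy (fun a b => decide (key b < key a)) x
        (ks.flatMap (fun k => L.filter (fun y => key y == k)))
      = ks.flatMap (fun k => (L ++ [x]).filter (fun y => key y == k)) := by
  obtain ⟨s, t, rfl⟩ := List.append_of_mem hx
  rw [List.pairwise_append] at hks
  obtain ⟨hs, ht, hst⟩ := hks
  have hsgt : ∀ k ∈ s, k > key x := fun k hk => hst k hk (key x) (by simp)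
  have htlt : ∀ k ∈ t, key x > k := (List.pairwise_cons.mp ht).1
  have hfilt : ∀ k : Int, k ≠ key x →
      (L ++ [x]).filter (fun y => key y == k) = L.filter (fun y => key y == k) := by
    intro k hk
    rw [List.filter_append]
    have hbe : (key x == k) = false := by simp [Ne.symm hk]
    simp [List.filter, hbe]
  have hself : (L ++ [x]).filter (fun y => key y == key x)
      = L.filter (fun y => key y == key x) ++ [x] := by
    rw [List.filter_append]; simp [List.filter]
  rw [List.flatMap_append, List.flatMap_cons, List.flatMap_append, List.flatMap_cons]
  rw [pv_flatMap_congr (fun k hk => hfilt k (by have := hsgt k hk; omega)),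
      pv_flatMap_congr (fun k hk => hfilt k (by have := htlt k hk; omega)), hself]
  rw [← List.append_assoc, pv_insertBy_append_left, pv_insertBy_all_before]
  · simp
  · intro y hy
    simp only [List.mem_flatMap, List.mem_filter, beq_iff_eq] at hy
    obtain ⟨k, hk, _, hkey⟩ := hy
    simp only [decide_eq_true_eq]
    have := htlt k hk; omega
  · intro y hy
    simp only [List.mem_append, List.mem_flatMap, List.mem_filter, beq_iff_eq] at hy
    simp only [decide_eq_false_iff_not, not_lt]
    rcases hy with ⟨k, hk, _, hkey⟩ | ⟨_, hkey⟩
    · have := hsgt k hk; omega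
    · omega

theorem pv_bucket_fold {α : Type} (key : α → Int) (ks : List Int)
    (hks : ks.Pairwise (· > ·)) :
    ∀ (xs L : List α), (∀ x ∈ xs, key x ∈ ks) →
      xs.foldl (fun acc x => PySem.List.insertBy (fun a b => decide (key b < key a)) x acc)
          (ks.flatMap (fun k => L.filter (fun y => key y == k)))
        = ks.flatMap (fun k => (L ++ xs).filter (fun y => key y == k)) := by
  intro xs
  induction xs with
  | nil => intro L _; simp
  | cons x xs ih =>
    intro L hall
    rw [List.foldl_cons, pv_bucket_step key ks hks x (hall x (by simp)) L]
    have := ih (L ++ [x]) (fun y hy => hall y (by simp [hy]))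
    simpa using this

-- A's stable reverse-sort is exactly the concatenation of score groups, highest score first
theorem pv_sorted_rev_eq_buckets {α : Type} (key : α → Int) (ks : List Int)
    (hks : ks.Pairwise (· > ·)) (xs : List α) (hall : ∀ x ∈ xs, key x ∈ ks) :
    PySem.List.sorted xs key true = ks.flatMap (fun k => xs.filter (fun y => key y == k)) := by
  rw [PySem.List.sorted_rev_eq_foldl_insertBy]
  have h0 : ([] : List α) = ks.flatMap (fun k => ([] : List α).filter (fun y => key y == k)) := by
    simp
  rw [h0, pv_bucket_fold key ks hks xs [] hall]
  simp

-- A's preferred-loop accumulator equals B's two generator sums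
theorem pv_pref_fold_eq (st en isin : α → Bool) :
    ∀ (xs : List α) (a : Int),
      xs.foldl (fun s p =>
          if st p then (if en p then s + 1 else s) else (if isin p then s + 2 else s)) a
        = a + ((xs.filter (fun p => !st p && isin p)).map (fun _ => (2 : Int))).sum
            + ((xs.filter (fun p => st p && en p)).map (fun _ => (1 : Int))).sum := by
  intro xs
  induction xs with
  | nil => intro a; simp
  | cons x xs ih =>
    intro a
    by_cases h1 : st x = true <;> by_cases h2 : en x = true <;> by_cases h3 : isin x = true <;>
      simp [List.foldl_cons, h1, h2, h3, ih] <;> ring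

-- A's bad-loop accumulator equals B's penalty sum
theorem pv_bad_fold_eq (isin : α → Bool) :
    ∀ (xs : List α) (a : Int),
      xs.foldl (fun s b => if isin b then s - 2 else s) a
        = a - ((xs.filter isin).map (fun _ => (2 : Int))).sum := by
  intro xs
  induction xs with
  | nil => intro a; simp
  | cons x xs ih =>
    intro a
    by_cases h : isin x = true <;> simp [List.foldl_cons, h, ih] <;> ring

theorem pv_score_eq (preferred bad : List String) (u : String) :
    pvScoreA preferred bad u = pvScoreB preferred bad u := by
  unfold pvScoreA pvScoreB
  rw [pv_bad_fold_eq, pv_pref_fold_eq]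
  ring

-- two mutually exclusive filters together keep at most every element
theorem pv_filter_disjoint_length {α : Type} (p q : α → Bool)
    (h : ∀ x, p x = true → q x = false) (xs : List α) :
    (xs.filter p).length + (xs.filter q).length ≤ xs.length := by
  induction xs with
  | nil => simp
  | cons x xs ih =>
    by_cases hp : p x = true
    · simp [hp, h x hp]; omega
    · by_cases hq : q x = true <;> simp [hp, hq] <;> omega

-- every score lies in B's counting range
theorem pv_score_bounds (preferred bad : List String) (u : String) :
    -2 * (bad.length : Int) ≤ pvScoreB preferred bad u
      ∧ pvScoreB preferred bad u ≤ 2 * (preferred.length : Int) := by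
  unfold pvScoreB
  rw [PySem.List.sum_map_const_int, PySem.List.sum_map_const_int, PySem.List.sum_map_const_int]
  have hb : (bad.filter (fun b => PySem.Str.isIn b u)).length ≤ bad.length :=
    List.length_filter_le _ _
  have hd := pv_filter_disjoint_length
      (fun p => !PySem.Str.startswith p "." && PySem.Str.isIn p u)
      (fun p => PySem.Str.startswith p "." && PySem.Str.endswith u p)
      (by intro x hx; simp at hx ⊢; intro hst; exact absurd hst (by simp [hx.1]))
      preferred
  constructor <;> omega

-- the descending counting range is strictly decreasing
theorem pv_range_pairwise_gt (a b : Int) :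
    (PySem.List.pyRange a b (-1)).Pairwise (· > ·) := by
  rw [PySem.List.pyRange_neg_one]
  refine List.Pairwise.map _ (fun k k' h => ?_) (List.pairwise_lt_range (n := (a - b).toNat))
  omega

-- ===== VERDICT (by name: the statement is the Claim_ definition above) =====
theorem prioritize_relevance_py_spec : Claim_equal_prioritize_relevance_py := by
  intro urls question asset topic _
  show prioritize_relevance_py urls question asset topic
      = prioritize_relevance_py_alt urls question asset topic
  unfold prioritize_relevance_py prioritize_relevance_py_alt
  rw [pv_tables_eq]
  set pb := pvTablesA topic with hpb
  set key := pvScoreB pb.1 pb.2 with hkey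
  set ks := PySem.List.pyRange (2 * (pb.1.length : Int)) (-2 * (pb.2.length : Int) - 1) (-1)
    with hks
  have hgt : ks.Pairwise (· > ·) := pv_range_pairwise_gt _ _
  have hall : ∀ u ∈ urls, key u ∈ ks := by
    intro u _
    rw [hks, PySem.List.mem_pyRange_neg_one]
    have := pv_score_bounds pb.1 pb.2 u
    rw [hkey]
    constructor <;> omega
  have hA : PySem.List.sorted urls (pvScoreA pb.1 pb.2) true
      = PySem.List.sorted urls key true := by
    have : pvScoreA pb.1 pb.2 = key := funext (fun u => pv_score_eq pb.1 pb.2 u)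
    rw [this]
  rw [hA, pv_sorted_rev_eq_buckets key ks hgt urls hall,
      PySem.List.foldl_append_eq_flatMap]
  simp only [List.nil_append]
  refine pv_flatMap_congr (fun s _ => ?_)
  rw [List.filter_map, List.map_map]
  simp [hkey, Function.comp_def]
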